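-- pv_equiv track=rewrite | github.com/mikedoug/advent-of-code | 2019/03/wire-test.py | findAllOverlappingPoints
-- ===== SOURCE A (Python) =====
-- def onSegment(p, q, r):
--     return q[0] <= max(p[0], r[0]) and q[0] >= min(p[0], r[0]) and q[1] <= max(p[1], r[1]) and q[1] >= min(p[1], r[1])
--
-- def findAllOverlappingPoints(p1, q1, p2, q2):
--     points = list()
--     for x in range(p1[0], q1[0] + 1):
--         for y in range(p1[1], q1[1] + 1):
--             point = (x, y)
--             if onSegment(p2, point, q2):
--                 points.append(point)
--     return points
-- ===== SOURCE B (Python) =====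
-- def findAllOverlappingPoints(p1, q1, p2, q2):
--     if p1[0] > q1[0] or p1[1] > q1[1]:
--         return []
--     xlo = max(p1[0], min(p2[0], q2[0]))
--     xhi = min(q1[0], max(p2[0], q2[0]))
--     ylo = max(p1[1], min(p2[1], q2[1]))
--     yhi = min(q1[1], max(p2[1], q2[1]))
--     return [(x, y) for x in range(xlo, xhi + 1) for y in range(ylo, yhi + 1)]
-- ===== Notes on version B (the rewrite author's own statement) =====
-- stated objective: alternative
-- what changed: Instead of scanning every lattice point of box 1 and testing each against box 2, B intersects the x-ranges and y-ranges once and enumerates only the overlap rectangle.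
-- outside the precondition, e.g. on findAllOverlappingPoints((0, 0), (1, 1), (5,), (6, 6)): A returns [], B raises IndexError
import Mathlib
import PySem

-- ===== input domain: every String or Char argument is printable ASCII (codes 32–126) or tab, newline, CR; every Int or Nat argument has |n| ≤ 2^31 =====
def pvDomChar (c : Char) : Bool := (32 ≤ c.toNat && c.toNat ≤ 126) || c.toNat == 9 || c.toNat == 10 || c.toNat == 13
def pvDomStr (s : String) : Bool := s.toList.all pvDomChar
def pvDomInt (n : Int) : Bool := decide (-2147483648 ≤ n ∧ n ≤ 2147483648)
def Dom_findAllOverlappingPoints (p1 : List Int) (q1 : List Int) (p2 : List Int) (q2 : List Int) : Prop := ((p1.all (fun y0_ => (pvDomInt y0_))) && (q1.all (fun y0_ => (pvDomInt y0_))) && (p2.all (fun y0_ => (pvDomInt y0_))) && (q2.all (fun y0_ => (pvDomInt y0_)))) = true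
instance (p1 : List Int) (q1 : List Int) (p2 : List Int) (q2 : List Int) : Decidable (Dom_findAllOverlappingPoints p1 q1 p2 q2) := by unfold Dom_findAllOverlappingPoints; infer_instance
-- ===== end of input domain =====

-- B replaces A's scan of every lattice point of box 1 (each tested against box 2)
-- by direct intersection of the x- and y-ranges, enumerating only the overlap rectangle (objective: alternative).

-- ===== PORT A =====
-- onSegment(p, q, r); indices are in range under Pre_ (pyGetD used with default 0)
def onSegmentPort (p q r : List Int) : Bool :=
  decide (PySem.List.pyGetD q 0 0 ≤ max (PySem.List.pyGetD p 0 0) (PySem.List.pyGetD r 0 0)) &&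
  decide (min (PySem.List.pyGetD p 0 0) (PySem.List.pyGetD r 0 0) ≤ PySem.List.pyGetD q 0 0) &&
  decide (PySem.List.pyGetD q 1 0 ≤ max (PySem.List.pyGetD p 1 0) (PySem.List.pyGetD r 1 0)) &&
  decide (min (PySem.List.pyGetD p 1 0) (PySem.List.pyGetD r 1 0) ≤ PySem.List.pyGetD q 1 0)

def findAllOverlappingPoints (p1 : List Int) (q1 : List Int) (p2 : List Int) (q2 : List Int) : List (List Int) :=
  (PySem.List.pyRange (PySem.List.pyGetD p1 0 0) (PySem.List.pyGetD q1 0 0 + 1) 1).foldl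
    (fun pts x =>
      (PySem.List.pyRange (PySem.List.pyGetD p1 1 0) (PySem.List.pyGetD q1 1 0 + 1) 1).foldl
        (fun pts y => if onSegmentPort p2 [x, y] q2 then pts ++ [[x, y]] else pts) pts) []

-- ===== PORT B =====
def findAllOverlappingPoints_alt (p1 : List Int) (q1 : List Int) (p2 : List Int) (q2 : List Int) : List (List Int) :=
  let a := PySem.List.pyGetD p1 0 0
  let b := PySem.List.pyGetD p1 1 0
  let c := PySem.List.pyGetD q1 0 0
  let d := PySem.List.pyGetD q1 1 0
  if a > c ∨ b > d then []
  else
    let e := PySem.List.pyGetD p2 0 0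
    let f := PySem.List.pyGetD p2 1 0
    let g := PySem.List.pyGetD q2 0 0
    let h := PySem.List.pyGetD q2 1 0
    let xlo := max a (min e g)
    let xhi := min c (max e g)
    let ylo := max b (min f h)
    let yhi := min d (max f h)
    (PySem.List.pyRange xlo (xhi + 1) 1).flatMap
      (fun x => (PySem.List.pyRange ylo (yhi + 1) 1).map (fun y => [x, y]))

-- ===== PRECONDITION & SPEC =====
-- Pre_ excludes the inputs where p2 or q2 is shorter than 2 although the loops run (there Python A
-- either raises IndexError or returns [] only because `and` short-circuits before the missing
-- coordinate, while B's Python raises), and the inputs where p1 or q1 is too short for A's reads.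
def Pre_findAllOverlappingPoints (p1 : List Int) (q1 : List Int) (p2 : List Int) (q2 : List Int) : Prop :=
  (1 ≤ p1.length ∧ 1 ≤ q1.length ∧ PySem.List.pyGetD q1 0 0 < PySem.List.pyGetD p1 0 0) ∨
  (2 ≤ p1.length ∧ 2 ≤ q1.length ∧
   ((PySem.List.pyGetD p1 0 0 ≤ PySem.List.pyGetD q1 0 0 ∧ PySem.List.pyGetD p1 1 0 ≤ PySem.List.pyGetD q1 1 0) →
     2 ≤ p2.length ∧ 2 ≤ q2.length))
instance (p1 : List Int) (q1 : List Int) (p2 : List Int) (q2 : List Int) : Decidable (Pre_findAllOverlappingPoints p1 q1 p2 q2) := by unfold Pre_findAllOverlappingPoints; infer_instance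

def pvWitness_findAllOverlappingPoints : List Int × List Int × List Int × List Int := ([0, 0], [2, 2], [1, 0], [3, 3])

def Spec_findAllOverlappingPoints (p1 : List Int) (q1 : List Int) (p2 : List Int) (q2 : List Int) (out : List (List Int)) : Prop := out = findAllOverlappingPoints_alt p1 q1 p2 q2
instance (p1 : List Int) (q1 : List Int) (p2 : List Int) (q2 : List Int) (out : List (List Int)) : Decidable (Spec_findAllOverlappingPoints p1 q1 p2 q2 out) := by unfold Spec_findAllOverlappingPoints; infer_instance

-- ===== CLAIM (what is proved, stated in full; the proofs are below) =====
def Claim_equal_findAllOverlappingPoints : Prop := ∀ (p1 : List Int) (q1 : List Int) (p2 : List Int) (q2 : List Int), Dom_findAllOverlappingPoints p1 q1 p2 q2 → Pre_findAllOverlappingPoints p1 q1 p2 q2 → Spec_findAllOverlappingPoints p1 q1 p2 q2 (findAllOverlappingPoints p1 q1 p2 q2)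

-- ===== LEMMAS AND PROOFS =====

-- filtering an ascending unit range by a two-sided bound is the intersected range

theorem filter_pyRange_interval (lo hi : Int) : ∀ (n : Nat) (a b : Int), (b - a).toNat ≤ n →
    (PySem.List.pyRange a b 1).filter (fun y => decide (y ≤ hi) && decide (lo ≤ y)) =
    PySem.List.pyRange (max a lo) (min b (hi + 1)) 1 := by
  intro n
  induction n with
  | zero =>
    intro a b h
    have hab : b ≤ a := by omega
    rw [PySem.List.pyRange_one_eq_nil hab,
        PySem.List.pyRange_one_eq_nil (le_trans (min_le_left _ _) (le_trans hab (le_max_left _ _)))]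
    rfl
  | succ n ih =>
    intro a b h
    by_cases hab : b ≤ a
    · rw [PySem.List.pyRange_one_eq_nil hab,
          PySem.List.pyRange_one_eq_nil (le_trans (min_le_left _ _) (le_trans hab (le_max_left _ _)))]
      rfl
    · push Not at hab
      rw [PySem.List.pyRange_one_cons hab, List.filter_cons, ih (a + 1) b (by omega)]
      by_cases h1 : a ≤ hi
      · by_cases h2 : lo ≤ a
        · have hmax : max a lo = a := by rw [max_def]; split_ifs <;> omega
          have hmax' : max (a + 1) lo = a + 1 := by rw [max_def]; split_ifs <;> omega
          have hlt : max a lo < min b (hi + 1) := by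
            rw [hmax, min_def]; split_ifs <;> omega
          rw [PySem.List.pyRange_one_cons hlt, hmax, hmax']
          simp [h1, h2]
        · push Not at h2
          have hmax : max a lo = max (a + 1) lo := by
            rw [max_def, max_def]; split_ifs <;> omega
          simp [hmax, show ¬ (lo ≤ a) from by omega]
      · push Not at h1
        have e1 : PySem.List.pyRange (max a lo) (min b (hi + 1)) 1 = [] :=
          PySem.List.pyRange_one_eq_nil (by
            rw [max_def, min_def]; split_ifs <;> omega)
        have e2 : PySem.List.pyRange (max (a + 1) lo) (min b (hi + 1)) 1 = [] :=
          PySem.List.pyRange_one_eq_nil (by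
            rw [max_def, min_def]; split_ifs <;> omega)
        rw [e1, e2]
        simp [show ¬ (a ≤ hi) from by omega]

-- a flatMap guarded by an if on the element is a flatMap over the filtered list
theorem flatMap_ite (l : List Int) (p : Int → Bool) (g : Int → List (List Int)) :
    l.flatMap (fun x => if p x then g x else []) = (l.filter p).flatMap g := by
  induction l with
  | nil => rfl
  | cons x t ih =>
    simp only [List.flatMap_cons, List.filter_cons]
    by_cases h : p x <;> simp [h, ih]

-- ===== VERDICT (by name: the statement is the Claim_ definition above) =====

theorem findAllOverlappingPoints_spec : Claim_equal_findAllOverlappingPoints := by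
  intro p1 q1 p2 q2 _ _
  unfold Spec_findAllOverlappingPoints
  simp only [findAllOverlappingPoints_alt]
  by_cases hg : PySem.List.pyGetD p1 0 0 > PySem.List.pyGetD q1 0 0 ∨ PySem.List.pyGetD p1 1 0 > PySem.List.pyGetD q1 1 0
  · rw [if_pos hg]
    unfold findAllOverlappingPoints
    rcases hg with hg | hg
    · rw [PySem.List.pyRange_one_eq_nil (show PySem.List.pyGetD q1 0 0 + 1 ≤ PySem.List.pyGetD p1 0 0 by omega)]
      rfl
    · rw [PySem.List.pyRange_one_eq_nil (show PySem.List.pyGetD q1 1 0 + 1 ≤ PySem.List.pyGetD p1 1 0 by omega)]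
      simp
  · rw [if_neg hg]
    push Not at hg
    obtain ⟨hac, hbd⟩ := hg
    unfold findAllOverlappingPoints
    have hP : ∀ x y : Int, onSegmentPort p2 [x, y] q2 =
        ((decide (x ≤ max (PySem.List.pyGetD p2 0 0) (PySem.List.pyGetD q2 0 0)) &&
          decide (min (PySem.List.pyGetD p2 0 0) (PySem.List.pyGetD q2 0 0) ≤ x)) &&
         (decide (y ≤ max (PySem.List.pyGetD p2 1 0) (PySem.List.pyGetD q2 1 0)) &&
          decide (min (PySem.List.pyGetD p2 1 0) (PySem.List.pyGetD q2 1 0) ≤ y))) := by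
      intro x y
      simp only [onSegmentPort,
        show PySem.List.pyGetD [x, y] 0 0 = x from rfl,
        show PySem.List.pyGetD [x, y] 1 0 = y from rfl]
      rw [Bool.and_assoc]
    have inner : ∀ (pts : List (List Int)) (x : Int),
        (PySem.List.pyRange (PySem.List.pyGetD p1 1 0) (PySem.List.pyGetD q1 1 0 + 1) 1).foldl
          (fun pts y => if onSegmentPort p2 [x, y] q2 then pts ++ [[x, y]] else pts) pts
        = pts ++ (if (decide (x ≤ max (PySem.List.pyGetD p2 0 0) (PySem.List.pyGetD q2 0 0)) &&
                      decide (min (PySem.List.pyGetD p2 0 0) (PySem.List.pyGetD q2 0 0) ≤ x)) then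
            (PySem.List.pyRange (max (PySem.List.pyGetD p1 1 0) (min (PySem.List.pyGetD p2 1 0) (PySem.List.pyGetD q2 1 0)))
                                (min (PySem.List.pyGetD q1 1 0) (max (PySem.List.pyGetD p2 1 0) (PySem.List.pyGetD q2 1 0)) + 1) 1).map
              (fun y => [x, y]) else []) := by
      intro pts x
      rw [PySem.List.foldl_append_if]
      congr 1
      rw [List.filter_congr (fun y _ => hP x y)]
      by_cases hx : (decide (x ≤ max (PySem.List.pyGetD p2 0 0) (PySem.List.pyGetD q2 0 0)) &&
                     decide (min (PySem.List.pyGetD p2 0 0) (PySem.List.pyGetD q2 0 0) ≤ x)) = true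
      · rw [if_pos hx]
        simp only [hx, Bool.true_and]
        rw [filter_pyRange_interval _ _ ((PySem.List.pyGetD q1 1 0 + 1 - PySem.List.pyGetD p1 1 0).toNat) _ _ le_rfl]
        rw [show min (PySem.List.pyGetD q1 1 0 + 1) (max (PySem.List.pyGetD p2 1 0) (PySem.List.pyGetD q2 1 0) + 1)
              = min (PySem.List.pyGetD q1 1 0) (max (PySem.List.pyGetD p2 1 0) (PySem.List.pyGetD q2 1 0)) + 1 from by
          rw [min_def, min_def]; split_ifs <;> omega]
      · rw [if_neg hx]
        simp only [Bool.not_eq_true] at hx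
        simp only [hx, Bool.false_and, List.filter_false, List.map_nil]
    simp only [inner]
    rw [PySem.List.foldl_append_eq_flatMap]
    rw [flatMap_ite]
    rw [filter_pyRange_interval _ _ ((PySem.List.pyGetD q1 0 0 + 1 - PySem.List.pyGetD p1 0 0).toNat) _ _ le_rfl]
    rw [show min (PySem.List.pyGetD q1 0 0 + 1) (max (PySem.List.pyGetD p2 0 0) (PySem.List.pyGetD q2 0 0) + 1)
          = min (PySem.List.pyGetD q1 0 0) (max (PySem.List.pyGetD p2 0 0) (PySem.List.pyGetD q2 0 0)) + 1 from by
      rw [min_def, min_def]; split_ifs <;> omega]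
    rfl
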